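-- pv_equiv track=rewrite | github.com/LliliLlooping/CMU_02604BioinformaticsAlgorithms | Week2/AdjacencyList.py | count_degrees
-- ===== SOURCE A (Python) =====
-- from typing import List, Dict
--
-- def count_degrees(adjacency_list: Dict[any, List[any]]) -> Dict[any, List[int]]:
--     """ Count degrees for every vertex.
--     """
--
--     degree_counts = {}
--
--     for ori, des_list in adjacency_list.items():
--
--         if ori not in degree_counts:
--             degree_counts[ori] = [0, 0]
--         degree_counts[ori][1] += len(des_list)
--
--         for des in des_list:
--             if des not in degree_counts:
--                 degree_counts[des] = [0, 0]
--             degree_counts[des][0] += 1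
--
--     return degree_counts
-- ===== SOURCE B (Python) =====
-- from typing import List, Dict
-- from collections import Counter
--
-- def count_degrees(adjacency_list: Dict[any, List[any]]) -> Dict[any, List[int]]:
--     """Count degrees for every vertex: in-degrees via one Counter pass over all
--     destinations, out-degrees as len of each source's list, merged in key order."""
--     in_counts = Counter(des for des_list in adjacency_list.values() for des in des_list)
--     result = {}
--     for ori, des_list in adjacency_list.items():
--         result[ori] = [in_counts[ori], len(des_list)]
--         for des in des_list:
--             if des not in result:
--                 result[des] = [in_counts[des], 0]
--     return result
-- ===== Notes on version B (the rewrite author's own statement) =====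
-- stated objective: simpler
-- what changed: Replaces the fused in-place accumulation loop (create-[0,0]-then-increment per edge endpoint) by two separate passes: a Counter of all destinations gives every in-degree at once, then the result dict is assembled in one merge pass writing each vertex's final [in, out] value directly instead of incrementing dict entries.
import Mathlib
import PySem

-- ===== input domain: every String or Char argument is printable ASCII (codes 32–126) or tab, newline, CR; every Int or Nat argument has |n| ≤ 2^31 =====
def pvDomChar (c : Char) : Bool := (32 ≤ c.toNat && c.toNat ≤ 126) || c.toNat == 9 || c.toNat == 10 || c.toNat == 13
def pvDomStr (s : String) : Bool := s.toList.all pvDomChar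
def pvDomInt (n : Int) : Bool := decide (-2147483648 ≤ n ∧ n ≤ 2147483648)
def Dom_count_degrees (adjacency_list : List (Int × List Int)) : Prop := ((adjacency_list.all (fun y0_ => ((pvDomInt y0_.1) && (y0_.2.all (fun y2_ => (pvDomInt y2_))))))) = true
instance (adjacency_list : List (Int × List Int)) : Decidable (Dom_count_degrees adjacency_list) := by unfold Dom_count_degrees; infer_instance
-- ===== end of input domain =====

-- B separates the two degree computations (a Counter of all destinations for in-degrees, list
-- lengths for out-degrees) and writes each vertex's final [in, out] pair directly in one merge
-- pass, instead of A's fused loop that creates [0,0] entries and increments them per edge; same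
-- result, objective: simpler.

-- ===== PORT A =====
-- xs[i] += n on an int list; exact here: every value list A stores is [_, _] and i is 0 or 1,
-- so the index is always in range (Python would raise IndexError only out of range).
def pvAddAt (xs : List Int) (i : Nat) (n : Int) : List Int := xs.set i (xs.getD i 0 + n)

def aInner (d : PySem.Dict Int (List Int)) (des : Int) : PySem.Dict Int (List Int) :=
  let d1 := if d.contains des then d else d.insert des [0, 0]
  d1.modify des [0, 0] (fun v => pvAddAt v 0 1)

def aOuter (d : PySem.Dict Int (List Int)) (p : Int × List Int) : PySem.Dict Int (List Int) :=
  let d1 := if d.contains p.1 then d else d.insert p.1 [0, 0]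
  let d2 := d1.modify p.1 [0, 0] (fun v => pvAddAt v 1 (p.2.length : Int))
  p.2.foldl aInner d2

def count_degrees (adjacency_list : List (Int × List Int)) : List (Int × List Int) :=
  (adjacency_list.foldl aOuter (PySem.Dict.empty : PySem.Dict Int (List Int))).items

-- ===== PORT B =====
def bInner (inCounts : PySem.Dict Int Int) (r : PySem.Dict Int (List Int)) (des : Int) :
    PySem.Dict Int (List Int) :=
  if r.contains des then r else r.insert des [inCounts.getD des 0, 0]

def bOuter (inCounts : PySem.Dict Int Int) (r : PySem.Dict Int (List Int)) (p : Int × List Int) :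
    PySem.Dict Int (List Int) :=
  p.2.foldl (bInner inCounts) (r.insert p.1 [inCounts.getD p.1 0, (p.2.length : Int)])

def count_degrees_alt (adjacency_list : List (Int × List Int)) : List (Int × List Int) :=
  let inCounts : PySem.Dict Int Int := PySem.Dict.counter (adjacency_list.flatMap (·.2))
  (adjacency_list.foldl (bOuter inCounts) (PySem.Dict.empty : PySem.Dict Int (List Int))).items

-- ===== PRECONDITION & SPEC =====
-- The Python parameter is a dict, so its keys are necessarily distinct; the association-list
-- encoding admits duplicate first components, which correspond to no Python input — Pre_ excludes
-- exactly those (it narrows nothing a Python caller can reach).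
def Pre_count_degrees (adjacency_list : List (Int × List Int)) : Prop :=
  (adjacency_list.map (·.1)).Nodup
instance (adjacency_list : List (Int × List Int)) : Decidable (Pre_count_degrees adjacency_list) := by unfold Pre_count_degrees; infer_instance

def pvWitness_count_degrees : (List (Int × List Int)) := [(1, [2, 3, 2]), (2, []), (4, [1, 4])]

def Spec_count_degrees (adjacency_list : List (Int × List Int)) (out : List (Int × List Int)) : Prop := out = count_degrees_alt adjacency_list
instance (adjacency_list : List (Int × List Int)) (out : List (Int × List Int)) : Decidable (Spec_count_degrees adjacency_list out) := by unfold Spec_count_degrees; infer_instance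

-- ===== CLAIM (what is proved, stated in full; the proofs are below) =====
def Claim_equal_count_degrees : Prop := ∀ (adjacency_list : List (Int × List Int)), Dom_count_degrees adjacency_list → Pre_count_degrees adjacency_list → Spec_count_degrees adjacency_list (count_degrees adjacency_list)

-- ===== LEMMAS AND PROOFS =====

-- pvAddAt algebra
theorem pvAddAt_zero (xs : List Int) (i : Nat) : pvAddAt xs i 0 = xs := by
  unfold pvAddAt
  by_cases h : i < xs.length
  · simp [List.getD_eq_getElem?_getD, List.getElem?_eq_getElem h, List.set_getElem_self]
  · exact List.set_eq_of_length_le (by omega)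

theorem pvAddAt_pvAddAt (xs : List Int) (i : Nat) (a b : Int) :
    pvAddAt (pvAddAt xs i a) i b = pvAddAt xs i (a + b) := by
  unfold pvAddAt
  by_cases h : i < xs.length
  · simp [List.getD_eq_getElem?_getD, List.getElem?_set_self h, List.set_set]
    ring_nf
  · have hle : xs.length ≤ i := by omega
    simp [List.set_eq_of_length_le hle]

theorem pvAddAt_comm (xs : List Int) (i j : Nat) (a b : Int) (hij : i ≠ j) :
    pvAddAt (pvAddAt xs i a) j b = pvAddAt (pvAddAt xs j b) i a := by
  unfold pvAddAt
  have h1 : (xs.set i (xs.getD i 0 + a)).getD j 0 = xs.getD j 0 := by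
    simp [List.getD_eq_getElem?_getD, List.getElem?_set_ne hij]
  have h2 : (xs.set j (xs.getD j 0 + b)).getD i 0 = xs.getD i 0 := by
    simp [List.getD_eq_getElem?_getD, List.getElem?_set_ne (Ne.symm hij)]
  rw [h1, h2, List.set_comm _ _ hij]

-- in/out degree totals of a prefix
def inCnt (l : List (Int × List Int)) (v : Int) : Int := ((l.flatMap (·.2)).count v : Int)
def outSum (l : List (Int × List Int)) (v : Int) : Int :=
  (l.map (fun p => if p.1 = v then (p.2.length : Int) else 0)).sum
def firstLen (l : List (Int × List Int)) (v : Int) : Int :=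
  match l.lookup v with
  | some ds => (ds.length : Int)
  | none => 0

-- ---- A-side value characterisation ----
theorem getD_condInsert (d : PySem.Dict Int (List Int)) (k v : Int) :
    ((if d.contains k then d else d.insert k ([0, 0] : List Int)).getD v [0, 0]) = d.getD v [0, 0] := by
  by_cases h : d.contains k
  · simp [h]
  · rw [if_neg h, PySem.Dict.getD_insert]
    by_cases hv : v = k
    · subst hv; rw [if_pos rfl, PySem.Dict.getD_of_not_contains d _ (by simp [h])]
    · rw [if_neg hv]

theorem contains_condInsert (d : PySem.Dict Int (List Int)) (k v : Int) :
    ((if d.contains k then d else d.insert k ([0, 0] : List Int)).contains v) =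
      (v == k || d.contains v) := by
  by_cases h : d.contains k
  · simp only [h, if_pos]
    by_cases hv : v = k
    · subst hv; simp [h]
    · simp [hv]
  · rw [if_neg h, PySem.Dict.contains_insert]

theorem aInner_getD (d : PySem.Dict Int (List Int)) (des v : Int) :
    (aInner d des).getD v [0, 0] =
      if v = des then pvAddAt (d.getD des [0, 0]) 0 1 else d.getD v [0, 0] := by
  unfold aInner
  rw [PySem.Dict.getD_modify, getD_condInsert, getD_condInsert]

theorem aInnerFold_getD (ds : List Int) (d : PySem.Dict Int (List Int)) (v : Int) :
    (ds.foldl aInner d).getD v [0, 0] = pvAddAt (d.getD v [0, 0]) 0 (ds.count v : Int) := by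
  induction ds generalizing d with
  | nil => simp [pvAddAt_zero]
  | cons x ds ih =>
    rw [List.foldl_cons, ih, aInner_getD]
    by_cases hv : v = x
    · subst hv
      rw [if_pos rfl, pvAddAt_pvAddAt, List.count_cons_self]
      push_cast; ring_nf
    · have hcc : (x :: ds).count v = ds.count v := by
        simp only [List.count_cons, beq_iff_eq, if_neg (Ne.symm hv : ¬ x = v), Nat.add_zero]
      rw [if_neg hv, hcc]

theorem aOuter_getD (d : PySem.Dict Int (List Int)) (p : Int × List Int) (v : Int) :
    (aOuter d p).getD v [0, 0] =
      pvAddAt (pvAddAt (d.getD v [0, 0]) 1 (if v = p.1 then (p.2.length : Int) else 0)) 0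
        ((p.2.count v : Nat) : Int) := by
  unfold aOuter
  rw [aInnerFold_getD, PySem.Dict.getD_modify, getD_condInsert]
  by_cases hv : v = p.1
  · subst hv; rw [if_pos rfl, if_pos rfl]
  · rw [if_neg hv, if_neg hv, getD_condInsert, pvAddAt_zero]

theorem aFold_getD (l : List (Int × List Int)) (d : PySem.Dict Int (List Int)) (v : Int) :
    (l.foldl aOuter d).getD v [0, 0] =
      pvAddAt (pvAddAt (d.getD v [0, 0]) 1 (outSum l v)) 0 (inCnt l v) := by
  induction l generalizing d with
  | nil => simp [outSum, inCnt, pvAddAt_zero]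
  | cons p l ih =>
    have h1 : (if v = p.1 then (p.2.length : Int) else 0) + outSum l v = outSum (p :: l) v := by
      unfold outSum
      rw [List.map_cons, List.sum_cons]
      by_cases hv : v = p.1
      · rw [if_pos hv, if_pos hv.symm]
      · rw [if_neg hv, if_neg (fun h => hv h.symm)]
    have h2 : ((p.2.count v : Nat) : Int) + inCnt l v = inCnt (p :: l) v := by
      unfold inCnt
      rw [List.flatMap_cons, List.count_append]
      push_cast; ring
    rw [List.foldl_cons, ih, aOuter_getD,
        pvAddAt_comm _ 0 1 _ _ (by omega), pvAddAt_pvAddAt, pvAddAt_pvAddAt, h1, h2]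

-- ---- B-side value characterisation ----
theorem bInner_getD (c : PySem.Dict Int Int) (r : PySem.Dict Int (List Int)) (des v : Int) :
    (bInner c r des).getD v [0, 0] =
      if r.contains v = false ∧ v = des then [c.getD des 0, 0] else r.getD v [0, 0] := by
  unfold bInner
  by_cases h : r.contains des
  · rw [if_pos h]
    by_cases hv : v = des
    · subst hv; simp [h]
    · simp [hv]
  · rw [if_neg h, PySem.Dict.getD_insert]
    by_cases hv : v = des
    · subst hv; simp [h]
    · simp [hv]

theorem bInner_contains (c : PySem.Dict Int Int) (r : PySem.Dict Int (List Int)) (des v : Int) :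
    (bInner c r des).contains v = (r.contains v || v == des) := by
  unfold bInner
  by_cases h : r.contains des
  · rw [if_pos h]
    by_cases hv : v = des
    · subst hv; simp [h]
    · simp [hv]
  · rw [if_neg h, PySem.Dict.contains_insert, Bool.or_comm]

theorem bInnerFold_getD (c : PySem.Dict Int Int) (ds : List Int)
    (r : PySem.Dict Int (List Int)) (v : Int) :
    (ds.foldl (bInner c) r).getD v [0, 0] =
      if r.contains v = false ∧ v ∈ ds then [c.getD v 0, 0] else r.getD v [0, 0] := by
  induction ds generalizing r with
  | nil => simp
  | cons x ds ih =>
    rw [List.foldl_cons, ih, bInner_contains, bInner_getD]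
    by_cases hc : r.contains v
    · simp [hc]
    · simp only [hc, Bool.false_or]
      by_cases hv : v = x
      · subst hv; simp
      · simp [hv]

theorem bInnerFold_contains (c : PySem.Dict Int Int) (ds : List Int)
    (r : PySem.Dict Int (List Int)) (v : Int) :
    (ds.foldl (bInner c) r).contains v = (r.contains v || decide (v ∈ ds)) := by
  induction ds generalizing r with
  | nil => simp
  | cons x ds ih =>
    rw [List.foldl_cons, ih, bInner_contains]
    by_cases hv : v = x
    · subst hv; simp
    · have hbeq : (v == x) = false := by simp [hv]
      rw [hbeq, Bool.or_false]
      by_cases hm : v ∈ ds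
      · simp [hm]
      · simp [hm, hv]

theorem bFold_getD (c : PySem.Dict Int Int) (l : List (Int × List Int))
    (r : PySem.Dict Int (List Int)) (v : Int) (hnd : (l.map (·.1)).Nodup) :
    (l.foldl (bOuter c) r).getD v [0, 0] =
      if v ∈ l.map (·.1) then [c.getD v 0, firstLen l v]
      else if r.contains v then r.getD v [0, 0]
      else if v ∈ l.flatMap (·.2) then [c.getD v 0, 0]
      else [0, 0] := by
  induction l generalizing r with
  | nil =>
    rw [List.foldl_nil]
    simp only [List.map_nil, List.not_mem_nil, if_false, List.flatMap_nil]
    by_cases hc : r.contains v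
    · rw [if_pos hc]
    · rw [if_neg hc, PySem.Dict.getD_of_not_contains r _ (by simpa using hc)]
  | cons p l ih =>
    have hnd' : (l.map (·.1)).Nodup := (List.nodup_cons.mp hnd).2
    have hp1 : p.1 ∉ l.map (·.1) := (List.nodup_cons.mp hnd).1
    rw [List.foldl_cons, ih _ hnd']
    unfold bOuter
    by_cases hkl : v ∈ l.map (·.1)
    · have hvp : v ≠ p.1 := fun h => hp1 (h ▸ hkl)
      have hbeq : (v == p.1) = false := by simp [hvp]
      rw [if_pos hkl, if_pos (by simp [hkl])]
      have hlk : firstLen (p :: l) v = firstLen l v := by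
        unfold firstLen
        obtain ⟨a, b⟩ := p
        simp only at hbeq
        simp [List.lookup, hbeq]
      rw [hlk]
    · rw [if_neg hkl, bInnerFold_contains, bInnerFold_getD]
      by_cases hvp : v = p.1
      · subst hvp
        have hcon : (r.insert p.1 ([c.getD p.1 0, (p.2.length : Int)] : List Int)).contains p.1 = true := by
          rw [PySem.Dict.contains_insert]; simp
        have h1 : ((r.insert p.1 ([c.getD p.1 0, (p.2.length : Int)] : List Int)).contains p.1
            || decide (p.1 ∈ p.2)) = true := by rw [hcon]; simp
        rw [if_pos h1, if_neg (by simp [hcon]), PySem.Dict.getD_insert, if_pos rfl,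
            if_pos (show p.1 ∈ (p :: l).map (·.1) by simp)]
        have hfl : firstLen (p :: l) p.1 = (p.2.length : Int) := by
          unfold firstLen
          obtain ⟨a, b⟩ := p
          simp [List.lookup]
        rw [hfl]
      · have hbeq : (v == p.1) = false := by simp [hvp]
        have hcon1 : (r.insert p.1 ([c.getD p.1 0, (p.2.length : Int)] : List Int)).contains v = r.contains v := by
          rw [PySem.Dict.contains_insert, hbeq, Bool.false_or]
        have hgd : (r.insert p.1 ([c.getD p.1 0, (p.2.length : Int)] : List Int)).getD v [0, 0] = r.getD v [0, 0] := by
          rw [PySem.Dict.getD_insert, if_neg hvp]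
        rw [if_neg (show ¬ v ∈ (p :: l).map (·.1) by simp [hvp, hkl]), hcon1, hgd]
        by_cases hc : r.contains v
        · rw [if_pos (show (r.contains v || decide (v ∈ p.2)) = true by simp [hc]),
              if_neg (show ¬ (r.contains v = false ∧ v ∈ p.2) by simp [hc]), if_pos hc]
        · have hcf : r.contains v = false := by simpa using hc
          by_cases hds : v ∈ p.2
          · rw [if_pos (show (r.contains v || decide (v ∈ p.2)) = true by simp [hds]),
                if_pos ⟨hcf, hds⟩, if_neg hc,
                if_pos (show v ∈ (p :: l).flatMap (·.2) by simp [hds])]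
          · rw [if_neg (show ¬ ((r.contains v || decide (v ∈ p.2)) = true) by simp [hcf, hds]),
                if_neg hc]
            by_cases hfl : v ∈ l.flatMap (·.2)
            · rw [if_pos hfl, if_pos (by simp [hfl])]
            · rw [if_neg hfl, if_neg (by simp [hds, hfl])]

-- ---- keys ----
theorem keys_condInsert (d : PySem.Dict Int (List Int)) (k : Int) :
    (if d.contains k then d else d.insert k ([0, 0] : List Int)).keys = PySem.Set.add d.keys k := by
  rw [PySem.Set.add_eq_ite]
  by_cases h : d.contains k
  · rw [if_pos h, if_pos (by rw [← PySem.Dict.contains_iff_mem_keys]; exact h)]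
  · rw [if_neg h, if_neg (by rw [← PySem.Dict.contains_iff_mem_keys]; simp [h]),
        PySem.Dict.keys_insert_of_not_contains d _ (by simpa using h)]

theorem keys_insert_eq_add (d : PySem.Dict Int (List Int)) (k : Int) (w : List Int) :
    (d.insert k w).keys = PySem.Set.add d.keys k := by
  rw [PySem.Set.add_eq_ite]
  by_cases h : d.contains k
  · rw [if_pos (by rw [← PySem.Dict.contains_iff_mem_keys]; exact h)]
    exact PySem.Dict.keys_insert_of_contains d _ h
  · rw [if_neg (by rw [← PySem.Dict.contains_iff_mem_keys]; simp [h])]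
    exact PySem.Dict.keys_insert_of_not_contains d _ (by simpa using h)

theorem keys_modify_present (d : PySem.Dict Int (List Int)) (k : Int) (f : List Int → List Int)
    (h : d.contains k = true) : (d.modify k [0, 0] f).keys = d.keys := by
  rw [PySem.Dict.keys_modify]
  exact PySem.Dict.keys_insert_of_contains d _ h

theorem aInner_keys (d : PySem.Dict Int (List Int)) (des : Int) :
    (aInner d des).keys = PySem.Set.add d.keys des := by
  unfold aInner
  rw [keys_modify_present _ _ _ (by rw [contains_condInsert]; simp), keys_condInsert]

theorem bInner_keys (c : PySem.Dict Int Int) (r : PySem.Dict Int (List Int)) (des : Int) :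
    (bInner c r des).keys = PySem.Set.add r.keys des := by
  unfold bInner
  rw [PySem.Set.add_eq_ite]
  by_cases h : r.contains des
  · rw [if_pos h, if_pos (by rw [← PySem.Dict.contains_iff_mem_keys]; exact h)]
  · rw [if_neg h, if_neg (by rw [← PySem.Dict.contains_iff_mem_keys]; simp [h])]
    exact PySem.Dict.keys_insert_of_not_contains r _ (by simpa using h)

theorem aInnerFold_keys (ds : List Int) (d : PySem.Dict Int (List Int)) :
    (ds.foldl aInner d).keys = PySem.Set.update d.keys ds := by
  induction ds generalizing d with
  | nil => rw [List.foldl_nil, PySem.Set.update_nil]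
  | cons x ds ih => rw [List.foldl_cons, ih, aInner_keys, PySem.Set.update_cons]

theorem bInnerFold_keys (c : PySem.Dict Int Int) (ds : List Int) (r : PySem.Dict Int (List Int)) :
    (ds.foldl (bInner c) r).keys = PySem.Set.update r.keys ds := by
  induction ds generalizing r with
  | nil => rw [List.foldl_nil, PySem.Set.update_nil]
  | cons x ds ih => rw [List.foldl_cons, ih, bInner_keys, PySem.Set.update_cons]

theorem aOuter_keys (d : PySem.Dict Int (List Int)) (p : Int × List Int) :
    (aOuter d p).keys = PySem.Set.update (PySem.Set.add d.keys p.1) p.2 := by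
  unfold aOuter
  rw [aInnerFold_keys, keys_modify_present _ _ _ (by rw [contains_condInsert]; simp),
      keys_condInsert]

theorem bOuter_keys (c : PySem.Dict Int Int) (r : PySem.Dict Int (List Int)) (p : Int × List Int) :
    (bOuter c r p).keys = PySem.Set.update (PySem.Set.add r.keys p.1) p.2 := by
  unfold bOuter
  rw [bInnerFold_keys, keys_insert_eq_add]

theorem aFold_keys (l : List (Int × List Int)) (d : PySem.Dict Int (List Int)) :
    (l.foldl aOuter d).keys = PySem.Set.update d.keys (l.flatMap (fun p => p.1 :: p.2)) := by
  induction l generalizing d with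
  | nil => simp [PySem.Set.update_nil]
  | cons p l ih =>
    rw [List.foldl_cons, ih, aOuter_keys, List.flatMap_cons, List.cons_append,
        PySem.Set.update_cons, PySem.Set.update_append]

theorem bFold_keys (c : PySem.Dict Int Int) (l : List (Int × List Int))
    (r : PySem.Dict Int (List Int)) :
    (l.foldl (bOuter c) r).keys = PySem.Set.update r.keys (l.flatMap (fun p => p.1 :: p.2)) := by
  induction l generalizing r with
  | nil => simp [PySem.Set.update_nil]
  | cons p l ih =>
    rw [List.foldl_cons, ih, bOuter_keys, List.flatMap_cons, List.cons_append,
        PySem.Set.update_cons, PySem.Set.update_append]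

-- ---- tying prefix totals to B's branches under Nodup keys ----
theorem outSum_eq_zero_of_not_mem (l : List (Int × List Int)) (v : Int)
    (h : v ∉ l.map (·.1)) : outSum l v = 0 := by
  induction l with
  | nil => rfl
  | cons p l ih =>
    have hp : ¬ p.1 = v := by
      intro he
      exact h (by rw [List.map_cons, he]; exact List.mem_cons_self)
    unfold outSum
    rw [List.map_cons, List.sum_cons, if_neg hp,
        show (l.map (fun p => if p.1 = v then (p.2.length : Int) else 0)).sum = outSum l v from rfl,
        ih (fun hm => h (by rw [List.map_cons]; exact List.mem_cons_of_mem _ hm))]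
    ring

theorem outSum_eq_firstLen (l : List (Int × List Int)) (v : Int)
    (hnd : (l.map (·.1)).Nodup) (hm : v ∈ l.map (·.1)) : outSum l v = firstLen l v := by
  induction l with
  | nil => simp at hm
  | cons p l ih =>
    have hnd' : (l.map (·.1)).Nodup := (List.nodup_cons.mp hnd).2
    by_cases hv : p.1 = v
    · have hnot : v ∉ l.map (·.1) := hv ▸ (List.nodup_cons.mp hnd).1
      have hfl : firstLen (p :: l) v = (p.2.length : Int) := by
        unfold firstLen
        obtain ⟨a, b⟩ := p
        simp only at hv
        simp [List.lookup, hv]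
      rw [hfl]
      unfold outSum
      rw [List.map_cons, List.sum_cons, if_pos hv,
          show (l.map (fun p => if p.1 = v then (p.2.length : Int) else 0)).sum = outSum l v from rfl,
          outSum_eq_zero_of_not_mem l v hnot]
      ring
    · have hm' : v ∈ l.map (·.1) := by
        rw [List.map_cons] at hm
        rcases List.mem_cons.mp hm with h | h
        · exact absurd h.symm hv
        · exact h
      have hfl : firstLen (p :: l) v = firstLen l v := by
        unfold firstLen
        obtain ⟨a, b⟩ := p
        simp only at hv
        have hva : v ≠ a := fun h2 => hv h2.symm
        have hbeq : (v == a) = false := by simp [hva]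
        simp [List.lookup, hbeq]
      rw [hfl, ← ih hnd' hm']
      unfold outSum
      rw [List.map_cons, List.sum_cons, if_neg hv]
      ring

-- ===== VERDICT (by name: the statement is the Claim_ definition above) =====
theorem count_degrees_spec : Claim_equal_count_degrees := by
  intro l _hdom hpre
  unfold Spec_count_degrees count_degrees count_degrees_alt
  have hkA := aFold_keys l PySem.Dict.empty
  have hkB := bFold_keys (PySem.Dict.counter (l.flatMap (·.2))) l PySem.Dict.empty
  rw [PySem.Dict.keys_empty] at hkA hkB
  have hknd : (l.foldl aOuter PySem.Dict.empty).keys.Nodup := by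
    rw [hkA, PySem.Set.update_nil_left]; exact PySem.Set.nodup_ofList _
  have hkndB : (l.foldl (bOuter (PySem.Dict.counter (l.flatMap (·.2)))) PySem.Dict.empty).keys.Nodup := by
    rw [hkB, PySem.Set.update_nil_left]; exact PySem.Set.nodup_ofList _
  rw [PySem.Dict.items_eq_map_keys _ hknd [0, 0], PySem.Dict.items_eq_map_keys _ hkndB [0, 0],
      hkA, hkB]
  apply List.map_congr_left
  intro v hv
  congr 1
  rw [aFold_getD, bFold_getD _ _ _ _ hpre]
  rw [PySem.Dict.getD_empty, PySem.Dict.getD_counter]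
  have hA : pvAddAt (pvAddAt ([0, 0] : List Int) 1 (outSum l v)) 0 (inCnt l v)
      = [inCnt l v, outSum l v] := by
    unfold pvAddAt; simp [List.getD]
  rw [hA]
  by_cases hkl : v ∈ l.map (·.1)
  · rw [if_pos hkl, inCnt, outSum_eq_firstLen l v hpre hkl]
  · rw [if_neg hkl, if_neg (by simp [PySem.Dict.contains_empty])]
    by_cases hfl : v ∈ l.flatMap (·.2)
    · rw [if_pos hfl, inCnt, outSum_eq_zero_of_not_mem l v hkl]
    · rw [if_neg hfl, inCnt, outSum_eq_zero_of_not_mem l v hkl]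
      have : (l.flatMap (·.2)).count v = 0 := List.count_eq_zero.mpr hfl
      rw [this]; rfl
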